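-- pv_equiv track=rewrite | github.com/TekhneVision/tekv_Analyzer | TekV Analyzer/src/trainingAnalyzer.py | calculateTotalBySite
-- ===== SOURCE A (Python) =====
-- def calculateTotalBySite(report):
--     siteKey = {}
--
--     for row in report:
--         key = row[1]
--         if key not in siteKey:
--             siteKey[key]= 1
--         else:
--             siteKey[key] += 1
--
--     return siteKey
-- ===== SOURCE B (Python) =====
-- def calculateTotalBySite(report):
--     keys = [row[1] for row in report]
--     return {k: keys.count(k) for k in dict.fromkeys(keys)}
-- ===== Notes on version B (the rewrite author's own statement) =====
-- stated objective: alternative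
-- what changed: Replaces the accumulating dict loop by extracting the key column once, deduplicating it, and building the result with a per-distinct-key list.count scan.
import Mathlib
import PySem

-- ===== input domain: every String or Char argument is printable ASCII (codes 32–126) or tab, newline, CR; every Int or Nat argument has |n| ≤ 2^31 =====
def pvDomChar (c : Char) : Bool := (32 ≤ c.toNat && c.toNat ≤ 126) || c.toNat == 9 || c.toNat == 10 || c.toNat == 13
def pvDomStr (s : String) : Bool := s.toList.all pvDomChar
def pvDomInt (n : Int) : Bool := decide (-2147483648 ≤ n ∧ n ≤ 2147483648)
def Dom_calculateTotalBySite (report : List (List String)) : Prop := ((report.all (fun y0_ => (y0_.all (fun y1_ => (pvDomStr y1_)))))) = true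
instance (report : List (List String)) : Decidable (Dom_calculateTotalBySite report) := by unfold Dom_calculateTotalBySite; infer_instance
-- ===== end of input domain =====

-- B builds the tally by deduplicating the key column and counting each distinct key, instead of A's accumulating dict loop; equivalence is over the return value (a plain dict) on reports whose rows all have a second field.

-- ===== PORT A =====
-- row[1] is total via pyGet?/getD ""; Pre_ excludes the rows where Python's row[1] raises, so the default is never reached on admitted inputs.
def calculateTotalBySite (report : List (List String)) : List (String × Int) :=
  (report.foldl (fun d row =>
      let key := (PySem.List.pyGet? row 1).getD ""
      if d.contains key = false then d.insert key 1
      else d.insert key (d.getD key 0 + 1))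
    (PySem.Dict.empty : PySem.Dict String Int)).items

-- ===== PORT B =====
def calculateTotalBySite_alt (report : List (List String)) : List (String × Int) :=
  let keys := report.map (fun row => (PySem.List.pyGet? row 1).getD "")
  (PySem.List.dedup keys).map (fun k => (k, (keys.count k : Int)))

-- ===== PRECONDITION & SPEC =====
-- Pre_ excludes exactly the reports containing a row with fewer than 2 fields, on which A raises IndexError at row[1].
def Pre_calculateTotalBySite (report : List (List String)) : Prop :=
  ∀ row ∈ report, 2 ≤ row.length
instance (report : List (List String)) : Decidable (Pre_calculateTotalBySite report) := by unfold Pre_calculateTotalBySite; infer_instance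

def pvWitness_calculateTotalBySite : List (List String) := [["r1", "siteA"], ["r2", "siteB"], ["r3", "siteA"]]

def Spec_calculateTotalBySite (report : List (List String)) (out : List (String × Int)) : Prop := out = calculateTotalBySite_alt report
instance (report : List (List String)) (out : List (String × Int)) : Decidable (Spec_calculateTotalBySite report out) := by unfold Spec_calculateTotalBySite; infer_instance

-- ===== CLAIM (what is proved, stated in full; the proofs are below) =====
def Claim_equal_calculateTotalBySite : Prop := ∀ (report : List (List String)), Dom_calculateTotalBySite report → Pre_calculateTotalBySite report → Spec_calculateTotalBySite report (calculateTotalBySite report)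

-- ===== LEMMAS AND PROOFS =====

-- A's fold over rows is the counter of the extracted key column.
theorem calcA_fold_eq (report : List (List String)) (d : PySem.Dict String Int) :
    report.foldl (fun d row =>
        let key := (PySem.List.pyGet? row 1).getD ""
        if d.contains key = false then d.insert key 1
        else d.insert key (d.getD key 0 + 1)) d
      = (report.map (fun row => (PySem.List.pyGet? row 1).getD "")).foldl
          (fun d x => d.insert x (d.getD x 0 + 1)) d := by
  induction report generalizing d with
  | nil => rfl
  | cons row rest ih =>
    simp only [List.foldl_cons, List.map_cons]
    rw [← ih]
    by_cases h : d.contains ((PySem.List.pyGet? row 1).getD "") = false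
    · simp [h, PySem.Dict.getD_of_not_contains]
    · simp [h]

theorem calcA_eq_counter (report : List (List String)) :
    calculateTotalBySite report
      = (PySem.Dict.counter (report.map (fun row => (PySem.List.pyGet? row 1).getD ""))).items := by
  unfold calculateTotalBySite
  rw [calcA_fold_eq, ← PySem.Dict.foldl_insert_getD_add_one_eq_counter]

-- ===== VERDICT (by name: the statement is the Claim_ definition above) =====
theorem calculateTotalBySite_spec : Claim_equal_calculateTotalBySite := by
  intro report _ _
  unfold Spec_calculateTotalBySite calculateTotalBySite_alt
  rw [calcA_eq_counter, PySem.Dict.items_counter]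
  simp
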